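-- pv_equiv track=rewrite | github.com/specklesystems/speckle-blender | bpy_speckle/converter/to_speckle/mesh_to_speckle.py | is_closed_mesh
-- ===== SOURCE A (Python) =====
-- from typing import Dict, List, cast
--
-- def is_closed_mesh(faces: List[int]) -> bool:
--     edge_counts = {}
--
--     i = 0
--     while i < len(faces):
--         vertex_count = faces[i]
--         for j in range(vertex_count):
--             v1 = faces[i + 1 + j]
--             v2 = faces[i + 1 + ((j + 1) % vertex_count)]
--             edge = tuple(sorted([v1, v2]))
--             edge_counts[edge] = edge_counts.get(edge, 0) + 1
--
--         i += vertex_count + 1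
--
--     return all(count == 2 for count in edge_counts.values())
-- ===== SOURCE B (Python) =====
-- def is_closed_mesh(faces):
--     # Collect every (sorted) edge of the flat face stream into a list,
--     # sort it, then verify the sorted list consists of exact pairs.
--     edges = []
--     i = 0
--     n = len(faces)
--     while i < n:
--         k = faces[i]
--         ring = faces[i + 1:i + 1 + k]
--         for j in range(k):
--             a = ring[j]
--             b = ring[(j + 1) % k]
--             edges.append((a, b) if a <= b else (b, a))
--         i += k + 1
--     edges.sort()
--     m = len(edges)
--     i = 0
--     while i < m:
--         if i + 1 == m or edges[i] != edges[i + 1]: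
--             return False
--         if i + 2 < m and edges[i + 2] == edges[i]:
--             return False
--         i += 2
--     return True
-- ===== Notes on version B (the rewrite author's own statement) =====
-- stated objective: alternative
-- what changed: Replaces the hash-map edge counter checked with all(count == 2) by collecting each face's sorted edge tuples into a flat list, sorting that list, and scanning it once to verify it consists of exact adjacent pairs (every run of equal edges has length exactly 2).
-- outside the precondition, e.g. on is_closed_mesh([-2, 2]): A returns True, B returns True
import Mathlib
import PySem

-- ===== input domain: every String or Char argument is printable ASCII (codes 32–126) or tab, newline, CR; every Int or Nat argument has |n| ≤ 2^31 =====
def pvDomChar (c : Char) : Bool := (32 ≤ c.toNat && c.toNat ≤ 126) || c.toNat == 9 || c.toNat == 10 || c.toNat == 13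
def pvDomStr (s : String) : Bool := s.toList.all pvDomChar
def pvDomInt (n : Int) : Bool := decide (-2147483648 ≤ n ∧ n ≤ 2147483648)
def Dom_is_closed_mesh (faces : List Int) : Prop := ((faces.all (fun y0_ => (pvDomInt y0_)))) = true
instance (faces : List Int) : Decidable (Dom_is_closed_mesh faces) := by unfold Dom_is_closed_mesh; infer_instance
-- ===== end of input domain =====

-- B replaces A's hash-map edge counting (all counts == 2) by collect-sort-then-scan for
-- exact adjacent pairs; a different algorithm of similar cost, not claimed faster.

-- ===== PORT A =====
-- A's while/for loops: recursion on the remaining suffix of `faces`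
-- (i += vertex_count + 1 becomes dropping the consumed chunk); the dependent-if is a
-- totality guard only: outside it Python raises IndexError or never terminates (outside Pre_).
def pvLoopA (rest : List Int) (d : PySem.Dict (Int × Int) Int) : PySem.Dict (Int × Int) Int :=
  match rest with
  | [] => d
  | n :: tail =>
    if h : 0 ≤ n ∧ n.toNat ≤ tail.length then
      let d' := (PySem.List.pyRange 0 n 1).foldl (fun d j =>
        let v1 := PySem.List.pyGetD tail j 0
        let v2 := PySem.List.pyGetD tail (PySem.Int.mod (j + 1) n) 0
        let e := if v1 ≤ v2 then (v1, v2) else (v2, v1)   -- tuple(sorted([v1, v2]))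
        d.insert e (d.getD e 0 + 1)) d
      pvLoopA (tail.drop n.toNat) d'
    else d
termination_by rest.length
decreasing_by simp

def is_closed_mesh (faces : List Int) : Bool :=
  (pvLoopA faces PySem.Dict.empty).values.all (fun c => c == 2)

-- ===== PORT B =====
-- same parsing loop as Source B, appending each sorted edge tuple to `edges`
def pvLoopB (rest : List Int) (acc : List (Int × Int)) : List (Int × Int) :=
  match rest with
  | [] => acc
  | k :: tail =>
    if h : 0 ≤ k ∧ k.toNat ≤ tail.length then
      let ring := PySem.List.slice tail (some 0) (some k)   -- faces[i + 1 : i + 1 + k]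
      let acc' := (PySem.List.pyRange 0 k 1).foldl (fun acc j =>
        let a := PySem.List.pyGetD ring j 0
        let b := PySem.List.pyGetD ring (PySem.Int.mod (j + 1) k) 0
        acc ++ [if a ≤ b then (a, b) else (b, a)]) acc
      pvLoopB (tail.drop k.toNat) acc'
    else acc
termination_by rest.length
decreasing_by simp

-- Source B's final while loop over the sorted list: each step looks at edges[i], edges[i+1], edges[i+2]
def pvPairCheck : List (Int × Int) → Bool
  | [] => true
  | [_] => false
  | x :: y :: rest =>
    if x ≠ y then false
    else if rest.head? = some x then false
    else pvPairCheck rest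

def is_closed_mesh_alt (faces : List Int) : Bool :=
  pvPairCheck (PySem.List.sorted2 (pvLoopB faces []) Prod.fst Prod.snd)

-- ===== PRECONDITION & SPEC =====
-- Pre_ restricts to well-formed face streams — every vertex count n satisfies
-- 0 ≤ n ≤ (number of entries remaining after it): the natural domain of the function;
-- outside it A raises IndexError, loops forever, or reads vertex counts via
-- negative-index wraparound.
-- the Nat argument is pure structural-recursion bookkeeping (it starts at the list's
-- length, which the chunk-dropping recursion never exceeds); the condition itself is a
-- plain shape check on counts and lengths.
def pvWFAux : Nat → List Int → Bool
  | _, [] => true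
  | 0, _ :: _ => false
  | fuel + 1, n :: tail =>
      decide (0 ≤ n) && decide (n.toNat ≤ tail.length) && pvWFAux fuel (tail.drop n.toNat)

def pvWF (l : List Int) : Bool := pvWFAux l.length l

def Pre_is_closed_mesh (faces : List Int) : Prop := pvWF faces = true
instance (faces : List Int) : Decidable (Pre_is_closed_mesh faces) := by
  unfold Pre_is_closed_mesh; infer_instance

def pvWitness_is_closed_mesh : List Int := [3, 0, 1, 2, 3, 0, 2, 1]

def Spec_is_closed_mesh (faces : List Int) (out : Bool) : Prop := out = is_closed_mesh_alt faces
instance (faces : List Int) (out : Bool) : Decidable (Spec_is_closed_mesh faces out) := by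
  unfold Spec_is_closed_mesh; infer_instance

-- ===== CLAIM (what is proved, stated in full; the proofs are below) =====
def Claim_equal_is_closed_mesh : Prop := ∀ (faces : List Int), Dom_is_closed_mesh faces → Pre_is_closed_mesh faces → Spec_is_closed_mesh faces (is_closed_mesh faces)

-- ===== LEMMAS AND PROOFS =====

-- the edge stream both ports traverse, as a plain list
def pvChunk (n : Int) (tail : List Int) : List (Int × Int) :=
  (PySem.List.pyRange 0 n 1).map (fun j =>
    let v1 := PySem.List.pyGetD tail j 0
    let v2 := PySem.List.pyGetD tail (PySem.Int.mod (j + 1) n) 0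
    if v1 ≤ v2 then (v1, v2) else (v2, v1))

def pvEdges : List Int → List (Int × Int)
  | [] => []
  | n :: tail =>
    if 0 ≤ n ∧ n.toNat ≤ tail.length then pvChunk n tail ++ pvEdges (tail.drop n.toNat)
    else []
termination_by l => l.length
decreasing_by simp

-- A's loop is the counting fold over the edge stream
lemma pvLoopA_eq (rest : List Int) (d : PySem.Dict (Int × Int) Int) :
    pvLoopA rest d = (pvEdges rest).foldl (fun d e => d.insert e (d.getD e 0 + 1)) d := by
  fun_induction pvLoopA rest d with
  | case1 d => simp [pvEdges]
  | case2 n tail d h dp ih =>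
      rw [pvEdges, if_pos h, List.foldl_append, ih]
      congr 1
      simp only [pvChunk, List.foldl_map]
      rfl
  | case3 n tail d h =>
      rw [pvEdges, if_neg h]
      simp

-- slicing then indexing the ring is indexing the tail (in-range indices)
lemma pvRing_get (tail : List Int) (k j : Int) (hk : k.toNat ≤ tail.length)
    (h0 : 0 ≤ j) (hj : j < k) :
    PySem.List.pyGetD (PySem.List.slice tail (some 0) (some k)) j 0
      = PySem.List.pyGetD tail j 0 := by
  rw [PySem.List.slice_zero_start, PySem.List.slice_to tail (by omega)]
  rw [PySem.List.pyGetD_eq_getElem _ _ h0 (by simp; omega),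
      PySem.List.pyGetD_eq_getElem _ _ h0 (by omega)]
  rw [List.getElem_take]

-- B's loop appends exactly the edge stream
lemma pvLoopB_eq (rest : List Int) (acc : List (Int × Int)) :
    pvLoopB rest acc = acc ++ pvEdges rest := by
  fun_induction pvLoopB rest acc with
  | case1 acc => simp [pvEdges]
  | case2 A kk tl h ring accp ih =>
      rw [pvEdges, if_pos h, ih, ← List.append_assoc]
      congr 1
      have hacc : accp = A ++ (PySem.List.pyRange 0 kk).map (fun j =>
          if PySem.List.pyGetD (PySem.List.slice tl (some 0) (some kk)) j 0 ≤
              PySem.List.pyGetD (PySem.List.slice tl (some 0) (some kk)) (PySem.Int.mod (j + 1) kk) 0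
          then (PySem.List.pyGetD (PySem.List.slice tl (some 0) (some kk)) j 0,
                PySem.List.pyGetD (PySem.List.slice tl (some 0) (some kk)) (PySem.Int.mod (j + 1) kk) 0)
          else (PySem.List.pyGetD (PySem.List.slice tl (some 0) (some kk)) (PySem.Int.mod (j + 1) kk) 0,
                PySem.List.pyGetD (PySem.List.slice tl (some 0) (some kk)) j 0)) :=
        PySem.List.foldl_append_singleton_eq_map _ _ _
      rw [hacc]
      congr 1
      apply List.map_congr_left
      intro j hj
      rw [PySem.List.mem_pyRange_one] at hj
      have hk : 0 < kk := by omega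
      have e1 := pvRing_get tl kk j h.2 (by omega) (by omega)
      have e2 := pvRing_get tl kk (PySem.Int.mod (j + 1) kk) h.2
        (PySem.Int.mod_nonneg _ hk) (PySem.Int.mod_lt _ hk)
      simp only [e1, e2]
  | case3 A kk tl h =>
      rw [pvEdges, if_neg h]
      simp

-- strict lexicographic order on pairs: sorted2's comparator
def pvLexLt (a b : Int × Int) : Bool :=
  decide (a.1 < b.1) || (!decide (b.1 < a.1) && decide (a.2 < b.2))

lemma pvLexLt_conn {a b : Int × Int} (h1 : pvLexLt a b = false) (h2 : pvLexLt b a = false) :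
    a = b := by
  obtain ⟨a1, a2⟩ := a; obtain ⟨b1, b2⟩ := b
  simp [pvLexLt] at h1 h2
  have : a1 = b1 ∧ a2 = b2 := by constructor <;> omega
  simp [this.1, this.2]

lemma pvLexLt_asym {a b : Int × Int} (h : pvLexLt a b = true) : pvLexLt b a = false := by
  obtain ⟨a1, a2⟩ := a; obtain ⟨b1, b2⟩ := b
  simp [pvLexLt] at h ⊢
  omega

lemma pvLexLt_trans {a b c : Int × Int} (h1 : pvLexLt a b = true) (h2 : pvLexLt b c = true) :
    pvLexLt a c = true := by
  obtain ⟨a1, a2⟩ := a; obtain ⟨b1, b2⟩ := b; obtain ⟨c1, c2⟩ := c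
  simp [pvLexLt] at h1 h2 ⊢
  omega

lemma pairwise_insertBy (x : Int × Int) (l : List (Int × Int))
    (h : l.Pairwise (fun a b => pvLexLt b a = false)) :
    (PySem.List.insertBy pvLexLt x l).Pairwise (fun a b => pvLexLt b a = false) := by
  induction l with
  | nil => simp [PySem.List.insertBy]
  | cons y ys ih =>
      rw [List.pairwise_cons] at h
      obtain ⟨hy, hys⟩ := h
      rw [PySem.List.insertBy]
      by_cases hxy : pvLexLt x y = true
      · rw [if_pos hxy]
        refine List.Pairwise.cons ?_ (List.Pairwise.cons hy hys)
        intro z hz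
        rcases List.mem_cons.mp hz with rfl | hz'
        · exact pvLexLt_asym hxy
        · cases hzx : pvLexLt z x with
          | false => rfl
          | true =>
              have := pvLexLt_trans hzx hxy
              rw [hy z hz'] at this
              exact this.symm
      · rw [if_neg hxy]
        refine List.Pairwise.cons ?_ (ih hys)
        intro z hz
        rcases (PySem.List.mem_insertBy _ _ _ _).mp hz with rfl | hz'
        · exact Bool.not_eq_true _ ▸ (by simpa using hxy)
        · exact hy z hz'

lemma pairwise_sorted2_aux (xs : List (Int × Int)) (acc : List (Int × Int))
    (h : acc.Pairwise (fun a b => pvLexLt b a = false)) :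
    (xs.foldl (fun acc x => PySem.List.insertBy pvLexLt x acc) acc).Pairwise
      (fun a b => pvLexLt b a = false) := by
  induction xs generalizing acc with
  | nil => simpa using h
  | cons x xs ih => exact ih _ (pairwise_insertBy x acc h)

lemma pairwise_sorted2 (xs : List (Int × Int)) :
    (PySem.List.sorted2 xs Prod.fst Prod.snd).Pairwise (fun a b => pvLexLt b a = false) := by
  have : PySem.List.sorted2 xs Prod.fst Prod.snd
      = xs.foldl (fun acc x => PySem.List.insertBy pvLexLt x acc) [] := rfl
  rw [this]
  exact pairwise_sorted2_aux xs [] (by simp)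

lemma pvPairCheck_iff (s : List (Int × Int))
    (h : s.Pairwise (fun a b => pvLexLt b a = false)) :
    pvPairCheck s = true ↔ ∀ e ∈ s, s.count e = 2 := by
  revert h
  fun_induction pvPairCheck s with
  | case1 =>
      intro h
      simp
  | case2 x =>
      intro h
      simp only [Bool.false_eq_true, false_iff]
      intro H
      have := H x (by simp)
      simp at this
  | case3 x y rest hne =>
      intro h
      rw [List.pairwise_cons] at h; obtain ⟨hx, h2⟩ := h
      rw [List.pairwise_cons] at h2; obtain ⟨hy, h3⟩ := h2
      have hxr : x ∉ rest := by
        intro hm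
        exact hne (pvLexLt_conn (hy x hm) (hx y (by simp)))
      simp only [Bool.false_eq_true, false_iff]
      intro H
      have := H x (by simp)
      have hc0 : rest.count x = 0 := List.count_eq_zero.mpr hxr
      simp [hc0, Ne.symm hne] at this
  | case4 x y rest hne hhead =>
      intro h
      have hxy : x = y := not_not.mp hne
      subst hxy
      obtain ⟨rest', hrest⟩ : ∃ rest', rest = x :: rest' := by
        cases hr : rest with
        | nil => rw [hr] at hhead; simp at hhead
        | cons z t =>
            rw [hr] at hhead
            simp at hhead
            exact ⟨t, by rw [hhead]⟩
      subst hrest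
      simp only [Bool.false_eq_true, false_iff]
      intro H
      have := H x (by simp)
      simp at this
  | case5 x y rest hne hhead ih =>
      intro h
      have hxy : x = y := not_not.mp hne
      subst hxy
      rw [List.pairwise_cons] at h; obtain ⟨hx, h2⟩ := h
      rw [List.pairwise_cons] at h2; obtain ⟨hy, h3⟩ := h2
      have hxr : x ∉ rest := by
        intro hm
        cases hr : rest with
        | nil => rw [hr] at hm; simp at hm
        | cons z t =>
            rw [hr] at hm hy h3
            have hzx : z ≠ x := by
              intro hzz
              rw [hr, hzz] at hhead
              simp at hhead
            rcases List.mem_cons.mp hm with rfl | hmt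
            · exact hzx rfl
            · rw [List.pairwise_cons] at h3
              exact hzx (pvLexLt_conn (hy z (by simp)) (h3.1 x hmt))
      have hc0 : rest.count x = 0 := List.count_eq_zero.mpr hxr
      rw [ih h3]
      constructor
      · intro H e he
        rcases List.mem_cons.mp he with rfl | he'
        · simp [hc0]
        rcases List.mem_cons.mp he' with rfl | he''
        · simp [hc0]
        · have hex : e ≠ x := fun hh => hxr (hh ▸ he'')
          have := H e he''
          simp [Ne.symm hex, this]
      · intro H e he
        have hex : e ≠ x := fun hh => hxr (hh ▸ he)
        have := H e (by simp [he])
        simpa [Ne.symm hex] using this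

lemma pvCounter_all_two (E : List (Int × Int)) :
    (PySem.Dict.counter E).values.all (fun c => c == 2) = true ↔ ∀ e ∈ E, E.count e = 2 := by
  have hv : (PySem.Dict.counter E).values
      = (PySem.Set.ofList E).map (fun k => ((E.count k : Int))) := by
    show ((PySem.Dict.counter E).items).map (·.2) = _
    rw [PySem.Dict.items_counter, List.map_map]
    rfl
  rw [hv]
  simp only [List.all_eq_true, List.mem_map]
  constructor
  · intro H e he
    have := H ((E.count e : Int)) ⟨e, (PySem.Set.mem_ofList E e).mpr he, rfl⟩
    simp only [beq_iff_eq] at this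
    exact_mod_cast this
  · rintro H c ⟨e, he, rfl⟩
    have := H e ((PySem.Set.mem_ofList E e).mp he)
    simp [this]

lemma isA_iff (faces : List Int) :
    is_closed_mesh faces = true ↔ ∀ e ∈ pvEdges faces, (pvEdges faces).count e = 2 := by
  unfold is_closed_mesh
  rw [pvLoopA_eq, PySem.Dict.foldl_insert_getD_add_one_eq_counter]
  exact pvCounter_all_two _

lemma isB_iff (faces : List Int) :
    is_closed_mesh_alt faces = true ↔ ∀ e ∈ pvEdges faces, (pvEdges faces).count e = 2 := by
  unfold is_closed_mesh_alt
  rw [pvLoopB_eq]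
  simp only [List.nil_append]
  rw [pvPairCheck_iff _ (pairwise_sorted2 _)]
  have hp := PySem.List.sorted2_perm (pvEdges faces) Prod.fst Prod.snd false
  constructor
  · intro H e he
    have := H e (hp.mem_iff.mpr he)
    rwa [hp.count_eq] at this
  · intro H e he
    rw [hp.count_eq]
    exact H e (hp.mem_iff.mp he)

-- ===== VERDICT (by name: the statement is the Claim_ definition above) =====
theorem is_closed_mesh_spec : Claim_equal_is_closed_mesh := by
  intro faces _ _
  unfold Spec_is_closed_mesh
  exact Bool.coe_iff_coe.mp ((isA_iff faces).trans (isB_iff faces).symm)
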